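-- pv_equiv track=rewrite | github.com/Gavin0099/ai-governance-framework | governance_tools/gate_c_decision_set_builder.py | _count_by_lane
-- ===== SOURCE A (Python) =====
-- from typing import Any
--
-- LANES = ("copilot", "claude", "chatgpt")
--
-- def _lane(value: Any) -> str | None:
--     if value is None:
--         return None
--     lane = str(value).strip().lower()
--     return lane if lane in LANES else None
--
-- def _count_by_lane(rows: list[dict[str, Any]], window_id: str) -> dict[str, int]:
--     out = {k: 0 for k in LANES}
--     for row in rows:
--         if row.get("window_id") != window_id:
--             continue
--         lane = _lane(row.get("lane"))
--         if lane:
--             out[lane] += 1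
--     return out
-- ===== SOURCE B (Python) =====
-- from typing import Any
--
-- LANES = ("copilot", "claude", "chatgpt")
--
-- def _lane(value: Any) -> str | None:
--     if value is None:
--         return None
--     lane = str(value).strip().lower()
--     return lane if lane in LANES else None
--
-- def _count_by_lane(rows: list[dict[str, Any]], window_id: str) -> dict[str, int]:
--     return {
--         lane: sum(
--             1
--             for row in rows
--             if row.get("window_id") == window_id and _lane(row.get("lane")) == lane
--         )
--         for lane in LANES
--     }
-- ===== Notes on version B (the rewrite author's own statement) =====
-- stated objective: alternative
-- what changed: B replaces A's single accumulating dict pass with a dict comprehension over LANES where each lane's count is an independent full scan of rows (sum of matching rows), so no mutable counter dict is maintained.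
import Mathlib
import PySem

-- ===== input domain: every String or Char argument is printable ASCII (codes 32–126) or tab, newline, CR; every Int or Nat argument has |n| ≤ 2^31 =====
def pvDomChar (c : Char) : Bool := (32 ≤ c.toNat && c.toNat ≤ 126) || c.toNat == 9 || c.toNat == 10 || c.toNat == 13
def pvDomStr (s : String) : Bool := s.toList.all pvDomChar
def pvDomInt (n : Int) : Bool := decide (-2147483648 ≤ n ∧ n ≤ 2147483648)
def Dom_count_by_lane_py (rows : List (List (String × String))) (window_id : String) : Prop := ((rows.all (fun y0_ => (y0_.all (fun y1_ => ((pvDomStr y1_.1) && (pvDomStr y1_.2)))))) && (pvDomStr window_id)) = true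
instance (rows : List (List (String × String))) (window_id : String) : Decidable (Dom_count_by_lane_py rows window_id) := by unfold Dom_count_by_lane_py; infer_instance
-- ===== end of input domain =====

-- B computes each lane's count by an independent scan of rows (dict comprehension over LANES)
-- instead of A's single accumulating pass over a mutable counter dict; same cost class (alternative).

-- shared helper: Python's _lane (identical in Source A and Source B)
def pvLane (v : Option String) : Option String :=
  match v with
  | none => none
  | some s =>
    let lane := PySem.Str.lower (PySem.Str.strip s)
    if lane = "copilot" ∨ lane = "claude" ∨ lane = "chatgpt" then some lane else none

-- ===== PORT A =====
def count_by_lane_py (rows : List (List (String × String))) (window_id : String) : List (String × Int) :=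
  (rows.foldl (fun out row =>
      if (PySem.Dict.mk row).get? "window_id" ≠ some window_id then out
      else
        match pvLane ((PySem.Dict.mk row).get? "lane") with
        | none => out
        | some lane => out.modify lane 0 (· + 1))
    (((PySem.Dict.empty.insert "copilot" 0).insert "claude" 0).insert "chatgpt" 0)).items

-- ===== PORT B =====
def pvLaneCount (rows : List (List (String × String))) (window_id : String) (lane : String) : Int :=
  rows.foldl (fun acc row =>
    if (PySem.Dict.mk row).get? "window_id" = some window_id ∧
       pvLane ((PySem.Dict.mk row).get? "lane") = some lane
    then acc + 1 else acc) 0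

def count_by_lane_py_alt (rows : List (List (String × String))) (window_id : String) : List (String × Int) :=
  ["copilot", "claude", "chatgpt"].map (fun lane => (lane, pvLaneCount rows window_id lane))

-- ===== PRECONDITION & SPEC =====
def Spec_count_by_lane_py (rows : List (List (String × String))) (window_id : String) (out : List (String × Int)) : Prop := out = count_by_lane_py_alt rows window_id
instance (rows : List (List (String × String))) (window_id : String) (out : List (String × Int)) : Decidable (Spec_count_by_lane_py rows window_id out) := by unfold Spec_count_by_lane_py; infer_instance

-- ===== CLAIM (what is proved, stated in full; the proofs are below) =====
def Claim_equal_count_by_lane_py : Prop := ∀ (rows : List (List (String × String))) (window_id : String), Dom_count_by_lane_py rows window_id → Spec_count_by_lane_py rows window_id (count_by_lane_py rows window_id)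

-- ===== LEMMAS AND PROOFS =====

lemma pvLaneCount_cons (r : List (String × String)) (rows : List (List (String × String)))
    (window_id lane : String) :
    pvLaneCount (r :: rows) window_id lane =
      (if (PySem.Dict.mk r).get? "window_id" = some window_id ∧
          pvLane ((PySem.Dict.mk r).get? "lane") = some lane then 1 else 0)
        + pvLaneCount rows window_id lane := by
  unfold pvLaneCount
  rw [List.foldl_cons, PySem.List.foldl_ite_add_one, PySem.List.foldl_ite_add_one]
  split_ifs with h <;> ring

lemma pvLane_cases (v : Option String) (l : String) (h : pvLane v = some l) :
    l = "copilot" ∨ l = "claude" ∨ l = "chatgpt" := by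
  cases v with
  | none => exact absurd h (by simp [pvLane])
  | some s =>
    simp only [pvLane] at h
    generalize PySem.Str.lower (PySem.Str.strip s) = x at h
    split_ifs at h with hc
    · cases h; exact hc

lemma pvModify_cp (a b c : Int) :
    (PySem.Dict.mk [("copilot", a), ("claude", b), ("chatgpt", c)]).modify "copilot" 0 (· + 1)
      = PySem.Dict.mk [("copilot", a + 1), ("claude", b), ("chatgpt", c)] := by
  simp [PySem.Dict.modify, PySem.Dict.getD, PySem.Dict.get?, PySem.Dict.insert,
    PySem.Dict.contains]

lemma pvModify_cl (a b c : Int) :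
    (PySem.Dict.mk [("copilot", a), ("claude", b), ("chatgpt", c)]).modify "claude" 0 (· + 1)
      = PySem.Dict.mk [("copilot", a), ("claude", b + 1), ("chatgpt", c)] := by
  simp [PySem.Dict.modify, PySem.Dict.getD, PySem.Dict.get?, PySem.Dict.insert,
    PySem.Dict.contains]

lemma pvModify_cg (a b c : Int) :
    (PySem.Dict.mk [("copilot", a), ("claude", b), ("chatgpt", c)]).modify "chatgpt" 0 (· + 1)
      = PySem.Dict.mk [("copilot", a), ("claude", b), ("chatgpt", c + 1)] := by
  simp [PySem.Dict.modify, PySem.Dict.getD, PySem.Dict.get?, PySem.Dict.insert,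
    PySem.Dict.contains]

lemma pvFold_main (window_id : String) (rows : List (List (String × String))) (a b c : Int) :
    rows.foldl (fun out row =>
      if (PySem.Dict.mk row).get? "window_id" ≠ some window_id then out
      else
        match pvLane ((PySem.Dict.mk row).get? "lane") with
        | none => out
        | some lane => out.modify lane 0 (· + 1))
      (PySem.Dict.mk [("copilot", a), ("claude", b), ("chatgpt", c)]) =
    PySem.Dict.mk [("copilot", a + pvLaneCount rows window_id "copilot"),
                   ("claude", b + pvLaneCount rows window_id "claude"),
                   ("chatgpt", c + pvLaneCount rows window_id "chatgpt")] := by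
  induction rows generalizing a b c with
  | nil => simp [pvLaneCount]
  | cons r rows ih =>
    rw [List.foldl_cons]
    rw [pvLaneCount_cons, pvLaneCount_cons, pvLaneCount_cons]
    by_cases hw : (PySem.Dict.mk r).get? "window_id" = some window_id
    · simp only [hw, ne_eq, not_true_eq_false, if_false, true_and]
      cases hl : pvLane ((PySem.Dict.mk r).get? "lane") with
      | none =>
        rw [ih]
        simp
      | some lane =>
        rcases pvLane_cases _ _ hl with h1 | h1 | h1 <;> subst h1
        · simp only [pvModify_cp, ih]; simp; ring
        · simp only [pvModify_cl, ih]; simp; ring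
        · simp only [pvModify_cg, ih]; simp; ring
    · simp only [hw, ne_eq, not_false_eq_true, if_true, false_and, if_neg]
      rw [ih]
      simp

-- ===== VERDICT (by name: the statement is the Claim_ definition above) =====
theorem count_by_lane_py_spec : Claim_equal_count_by_lane_py := by
  intro rows window_id _
  show count_by_lane_py rows window_id = count_by_lane_py_alt rows window_id
  unfold count_by_lane_py count_by_lane_py_alt
  have h0 : (((PySem.Dict.empty.insert "copilot" (0:Int)).insert "claude" 0).insert "chatgpt" 0)
      = PySem.Dict.mk [("copilot", 0), ("claude", 0), ("chatgpt", 0)] := by rfl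
  rw [h0, pvFold_main]
  simp
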